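-- pv_equiv track=rewrite | github.com/023javi/ETSI-PlanificadorHorarios | ComputacionEvolutiva.py | calculate_p3_final
-- ===== SOURCE A (Python) =====
-- def calculate_p3_final(solution, dataset):
--     p3 = 0
--
--     # Iterar sobre cada día
--     solution_transp = zip(*solution)
--     for day in solution_transp:
--         last_seen = {}  # Registro de la última hora en que apareció cada asignatura
--         for hour, cell in enumerate(day):  # Recorrer las celdas del día con su índice (hora)
--             if isinstance(cell, list):  # Confirmar que la celda es una lista
--                 for subject in cell:  # Recorrer asignaturas en la celda
--                     if subject in last_seen:
--                         # Verificar si hay un hueco entre la hora actual y la última vez que apareció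
--                         if hour - last_seen[subject] > 1:
--                             p3 += 1
--                     # Actualizar la última vez que se vio la asignatura
--                     last_seen[subject] = hour
--     return int(p3)
-- ===== SOURCE B (Python) =====
-- def calculate_p3_final(solution, dataset):
--     total = 0
--     # Two-pass per day: build an index subject -> ordered list of hours, then count gaps per subject.
--     for day in zip(*solution):
--         index = {}
--         for hour, cell in enumerate(day):
--             if isinstance(cell, list):
--                 for subject in cell:
--                     index.setdefault(subject, []).append(hour)
--         for hours in index.values():
--             total += sum(1 for a, b in zip(hours, hours[1:]) if b - a > 1)
--     return int(total)
-- ===== Notes on version B (the rewrite author's own statement) =====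
-- stated objective: alternative
-- what changed: Replaces A's single-pass last-seen-dict gap detection with a two-pass decomposition per day: first build an index mapping each subject to its ordered list of hours, then count consecutive hour pairs more than 1 apart per subject.
import Mathlib
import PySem

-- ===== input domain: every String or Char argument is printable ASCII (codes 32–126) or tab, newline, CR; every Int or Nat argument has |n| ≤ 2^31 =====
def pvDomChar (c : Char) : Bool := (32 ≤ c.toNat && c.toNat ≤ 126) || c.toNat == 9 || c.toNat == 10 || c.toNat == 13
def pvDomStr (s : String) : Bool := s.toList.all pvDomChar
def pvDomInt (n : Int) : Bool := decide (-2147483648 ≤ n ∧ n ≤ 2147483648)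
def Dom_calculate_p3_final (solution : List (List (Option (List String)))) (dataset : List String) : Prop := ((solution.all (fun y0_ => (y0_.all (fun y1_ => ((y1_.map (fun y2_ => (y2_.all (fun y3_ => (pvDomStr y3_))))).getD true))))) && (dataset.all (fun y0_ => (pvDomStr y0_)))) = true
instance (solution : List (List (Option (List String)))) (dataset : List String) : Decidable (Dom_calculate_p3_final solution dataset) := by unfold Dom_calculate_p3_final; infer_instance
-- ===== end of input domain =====

-- B replaces A's single-pass last-seen-dict gap detection by a two-pass per day:
-- build an index subject → ordered hour list, then count consecutive pairs more than 1 apart (objective: alternative decomposition).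

-- ===== PORT A =====
-- zip(*solution): the Python built-in used identically by both sources (truncates to the shortest row)
def pyZipStarAux {α : Type} (r : List α) (rs : List (List α)) : List (List α) :=
  match r with
  | [] => []
  | a :: r' =>
    if rs.all (fun q => !q.isEmpty) then
      (a :: rs.map (fun q => q.headD a)) :: pyZipStarAux r' (rs.map List.tail)
    else []

def pyZipStar {α : Type} (rows : List (List α)) : List (List α) :=
  match rows with
  | [] => []
  | r :: rs => pyZipStarAux r rs

def calculate_p3_final (solution : List (List (Option (List String)))) (dataset : List String) : Int :=
  (pyZipStar solution).foldl
    (fun p3 day =>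
      ((PySem.List.enumerate day 0).foldl
        (fun (st : Int × PySem.Dict String Int) hc =>
          match hc.2 with
          | some cell =>
            cell.foldl
              (fun st subject =>
                (match st.2.get? subject with
                 | some h0 => if hc.1 - h0 > 1 then st.1 + 1 else st.1
                 | none => st.1,
                 st.2.insert subject hc.1)) st
          | none => st)
        (p3, PySem.Dict.empty)).1)
    0

-- ===== PORT B =====
-- sum(1 for a, b in zip(hours, hours[1:]) if b - a > 1)
def gapSum (hours : List Int) : Int :=
  (((hours.zip hours.tail).countP (fun p => decide (p.2 - p.1 > 1)) : Nat) : Int)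

def calculate_p3_final_alt (solution : List (List (Option (List String)))) (dataset : List String) : Int :=
  (pyZipStar solution).foldl
    (fun total day =>
      let index := (PySem.List.enumerate day 0).foldl
        (fun (d : PySem.Dict String (List Int)) hc =>
          match hc.2 with
          | some cell => cell.foldl (fun d subject => d.modify subject [] (· ++ [hc.1])) d
          | none => d)
        PySem.Dict.empty
      index.values.foldl (fun total hours => total + gapSum hours) total)
    0

-- ===== PRECONDITION & SPEC =====
def Spec_calculate_p3_final (solution : List (List (Option (List String)))) (dataset : List String) (out : Int) : Prop := out = calculate_p3_final_alt solution dataset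
instance (solution : List (List (Option (List String)))) (dataset : List String) (out : Int) : Decidable (Spec_calculate_p3_final solution dataset out) := by unfold Spec_calculate_p3_final; infer_instance

-- ===== CLAIM (what is proved, stated in full; the proofs are below) =====
def Claim_equal_calculate_p3_final : Prop := ∀ (solution : List (List (Option (List String)))) (dataset : List String), Dom_calculate_p3_final solution dataset → Spec_calculate_p3_final solution dataset (calculate_p3_final solution dataset)

-- ===== LEMMAS AND PROOFS =====

-- A's per-occurrence step (previous hour in a last-seen dict)
def stepA (st : Int × PySem.Dict String Int) (sh : String × Int) : Int × PySem.Dict String Int :=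
  (match st.2.get? sh.1 with
   | some h0 => if sh.2 - h0 > 1 then st.1 + 1 else st.1
   | none => st.1,
   st.2.insert sh.1 sh.2)

-- B's per-occurrence step (append the hour to the subject's list)
def stepB (d : PySem.Dict String (List Int)) (sh : String × Int) : PySem.Dict String (List Int) :=
  d.modify sh.1 [] (· ++ [sh.2])

-- the (subject, hour) occurrences of a day, in traversal order
def occ (day : List (Option (List String))) : List (String × Int) :=
  (PySem.List.enumerate day 0).flatMap (fun hc =>
    match hc.2 with
    | some cell => cell.map (fun s => (s, hc.1))
    | none => [])

def G (d : PySem.Dict String (List Int)) : Int := (d.values.map gapSum).sum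

lemma gapSum_append (hs : List Int) (h : Int) :
    gapSum (hs ++ [h]) = gapSum hs +
      (match hs.getLast? with
       | some h0 => if h - h0 > 1 then 1 else 0
       | none => 0) := by
  induction hs with
  | nil => simp [gapSum]
  | cons a t ih =>
    cases t with
    | nil => simp [gapSum]
    | cons b t' =>
      have hl : ((a :: b :: t').getLast? ) = ((b :: t').getLast?) := by simp
      simp only [gapSum, List.cons_append] at *
      simp only [List.zip, List.tail_cons, List.zipWith_cons_cons, List.countP_cons] at *
      rw [hl]
      omega

lemma sum_map_update {α : Type} [DecidableEq α] (l : List α) (g g' : α → Int) (s : α)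
    (hnd : l.Nodup) (hs : s ∈ l) (hne : ∀ k, k ≠ s → g' k = g k) :
    (l.map g').sum = (l.map g).sum + g' s - g s := by
  induction l with
  | nil => cases hs
  | cons a t ih =>
    rcases List.mem_cons.mp hs with rfl | hmem
    · have hnt : s ∉ t := (List.nodup_cons.mp hnd).1
      have : t.map g' = t.map g := List.map_congr_left (fun k hk => hne k (fun h => hnt (h ▸ hk)))
      simp [this]; ring
    · have ha : a ≠ s := fun h => (List.nodup_cons.mp hnd).1 (h ▸ hmem)
      have := ih (List.nodup_cons.mp hnd).2 hmem
      simp [hne a ha, this]; ring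

lemma nodup_stepB (idx : PySem.Dict String (List Int)) (sh : String × Int)
    (hnd : idx.keys.Nodup) : (stepB idx sh).keys.Nodup := by
  unfold stepB PySem.Dict.modify
  exact PySem.Dict.nodup_keys_insert _ _ _ hnd

lemma G_stepB (idx : PySem.Dict String (List Int)) (s : String) (h : Int)
    (hnd : idx.keys.Nodup) :
    G (stepB idx (s, h)) = G idx + gapSum ((idx.getD s []) ++ [h]) - gapSum (idx.getD s []) := by
  have hnd' : (stepB idx (s, h)).keys.Nodup := nodup_stepB idx (s, h) hnd
  unfold G
  rw [PySem.Dict.values_eq_map_keys _ hnd' ([] : List Int),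
      PySem.Dict.values_eq_map_keys _ hnd ([] : List Int)]
  unfold stepB PySem.Dict.modify at *
  rw [List.map_map, List.map_map]
  by_cases hc : idx.contains s = true
  · rw [PySem.Dict.keys_insert_of_contains _ _ hc]
    have hsmem : s ∈ idx.keys := (PySem.Dict.contains_iff_mem_keys _ _).mp hc
    rw [sum_map_update idx.keys (gapSum ∘ fun k => idx.getD k [])
        (gapSum ∘ fun k => (idx.insert s (idx.getD s [] ++ [h])).getD k []) s hnd hsmem
        (by intro k hk; simp [Function.comp, PySem.Dict.getD_insert, hk])]
    simp [Function.comp, PySem.Dict.getD_insert]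
  · have hcf : idx.contains s = false := by simpa using hc
    rw [PySem.Dict.keys_insert_of_not_contains _ _ hcf]
    rw [List.map_append, List.sum_append]
    have h2 : idx.getD s [] = [] := PySem.Dict.getD_of_not_contains _ _ hcf
    have h1 : idx.keys.map (gapSum ∘ fun k => (idx.insert s (idx.getD s [] ++ [h])).getD k [])
        = idx.keys.map (gapSum ∘ fun k => idx.getD k []) := by
      apply List.map_congr_left
      intro k hk
      have hks : k ≠ s := by
        intro he; rw [he] at hk
        exact absurd ((PySem.Dict.contains_iff_mem_keys _ _).mpr hk) (by simp [hcf])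
      simp [Function.comp, PySem.Dict.getD_insert, hks]
    rw [h1]
    simp [Function.comp, h2, gapSum]

lemma key_lemma (l : List (String × Int)) :
    ∀ (p : Int) (ls : PySem.Dict String Int) (idx : PySem.Dict String (List Int)),
    idx.keys.Nodup →
    (∀ s, ls.get? s = (idx.getD s []).getLast?) →
    (l.foldl stepA (p, ls)).1 = p + G (l.foldl stepB idx) - G idx := by
  induction l with
  | nil => intro p ls idx _ _; simp
  | cons sh t ih =>
    intro p ls idx hnd hinv
    obtain ⟨s, h⟩ := sh
    have hstep : stepA (p, ls) (s, h) =
        ((match ls.get? s with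
          | some h0 => if h - h0 > 1 then p + 1 else p
          | none => p), ls.insert s h) := rfl
    have hnd' : (stepB idx (s, h)).keys.Nodup := nodup_stepB idx (s, h) hnd
    have hinv' : ∀ t', (ls.insert s h).get? t' = ((stepB idx (s, h)).getD t' []).getLast? := by
      intro t'
      unfold stepB
      rw [PySem.Dict.get?_insert, PySem.Dict.getD_modify]
      by_cases ht : t' = s
      · simp [ht]
      · simp [ht, hinv t']
    have := ih (match ls.get? s with
          | some h0 => if h - h0 > 1 then p + 1 else p
          | none => p) (ls.insert s h) (stepB idx (s, h)) hnd' hinv'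
    simp only [List.foldl_cons, hstep, this]
    rw [G_stepB idx s h hnd]
    rw [hinv s, gapSum_append]
    cases hgl : (idx.getD s []).getLast? with
    | none => simp
    | some h0 => simp; split_ifs <;> ring

-- A's inner double loop over a day, as the port writes it
def innerA (day : List (Option (List String))) (p : Int) : Int × PySem.Dict String Int :=
  (PySem.List.enumerate day 0).foldl
    (fun (st : Int × PySem.Dict String Int) hc =>
      match hc.2 with
      | some cell =>
        cell.foldl
          (fun st subject =>
            (match st.2.get? subject with
             | some h0 => if hc.1 - h0 > 1 then st.1 + 1 else st.1
             | none => st.1,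
             st.2.insert subject hc.1)) st
      | none => st)
    (p, PySem.Dict.empty)

-- B's index-building loop over a day, as the port writes it
def innerB (day : List (Option (List String))) : PySem.Dict String (List Int) :=
  (PySem.List.enumerate day 0).foldl
    (fun (d : PySem.Dict String (List Int)) hc =>
      match hc.2 with
      | some cell => cell.foldl (fun d subject => d.modify subject [] (· ++ [hc.1])) d
      | none => d)
    PySem.Dict.empty

lemma innerA_eq_occ (day : List (Option (List String))) (p : Int) :
    innerA day p = (occ day).foldl stepA (p, PySem.Dict.empty) := by
  unfold innerA occ
  rw [List.foldl_flatMap]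
  apply PySem.List.foldl_congr_mem
  intro acc hc _
  cases hc.2 <;> simp [List.foldl_map, stepA]

lemma innerB_eq_occ (day : List (Option (List String))) :
    innerB day = (occ day).foldl stepB PySem.Dict.empty := by
  unfold innerB occ
  rw [List.foldl_flatMap]
  apply PySem.List.foldl_congr_mem
  intro acc hc _
  cases hc.2 <;> simp [List.foldl_map, stepB]

lemma day_lemma (day : List (Option (List String))) (p : Int) :
    (innerA day p).1 = p + G (innerB day) := by
  rw [innerA_eq_occ, innerB_eq_occ]
  have := key_lemma (occ day) p PySem.Dict.empty PySem.Dict.empty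
    (by simp [PySem.Dict.keys_empty]) (by intro s; simp [PySem.Dict.get?_empty, PySem.Dict.getD_empty])
  rw [this]
  have : G PySem.Dict.empty = 0 := by simp [G, PySem.Dict.values, PySem.Dict.empty]
  rw [this]; ring

-- ===== VERDICT (by name: the statement is the Claim_ definition above) =====
theorem calculate_p3_final_spec : Claim_equal_calculate_p3_final := by
  intro solution dataset _
  unfold Spec_calculate_p3_final calculate_p3_final calculate_p3_final_alt
  apply PySem.List.foldl_congr_mem
  intro acc day _
  have hA : ((PySem.List.enumerate day 0).foldl
      (fun (st : Int × PySem.Dict String Int) hc =>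
        match hc.2 with
        | some cell =>
          cell.foldl
            (fun st subject =>
              (match st.2.get? subject with
               | some h0 => if hc.1 - h0 > 1 then st.1 + 1 else st.1
               | none => st.1,
               st.2.insert subject hc.1)) st
        | none => st)
      (acc, PySem.Dict.empty)).1 = acc + G (innerB day) := day_lemma day acc
  rw [hA]
  rw [PySem.List.foldl_add (g := gapSum)]
  rfl
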